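-- pv_equiv track=rewrite | github.com/samiullahsaleem/cyberblock | CardsGame/Functions.py | secondhighest
-- ===== SOURCE A (Python) =====
-- def numtoeng(n):
--     if n == 1:
--         return "Ace"
--     elif n == 2:
--         return "Two"
--     elif n == 3:
--         return "Three"
--     elif n == 4:
--         return "Four"
--     elif n == 5:
--         return "Five"
--     elif n == 6:
--         return "Six"
--     elif n == 7:
--         return "Seven"
--     elif n == 8:
--         return "Eight"
--     elif n == 9:
--         return "Nine"
--     elif n == 10:
--         return "Ten"
--     elif n == 11:
--         return "Jack"
--     elif n == 12:
--         return "Queen"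
--     elif n == 13:
--         return "King"
--
-- def secondhighest(a,b,c):
--     if a == 1:
--         return numtoeng(a)
--     elif b == 1:
--         return numtoeng(b)
--     elif c == 1:
--         return numtoeng(c)
--     else:
--         for i in range(3):
--             if a < b:
--                 temp = b
--                 b = a
--                 a = temp
--             if b < c:
--                 temp = c
--                 c = b
--                 b = temp
--         return numtoeng(b)
-- ===== SOURCE B (Python) =====
-- CARD_NAMES = ["Ace", "Two", "Three", "Four", "Five", "Six", "Seven",
--               "Eight", "Nine", "Ten", "Jack", "Queen", "King"]
--
-- def secondhighest(a, b, c):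
--     if a == 1 or b == 1 or c == 1:
--         return "Ace"
--     m = a + b + c - max(a, b, c) - min(a, b, c)   # median = sum - max - min
--     return CARD_NAMES[m - 1] if 1 <= m <= 13 else None
-- ===== Notes on version B (the rewrite author's own statement) =====
-- stated objective: simpler
-- what changed: Replaces A's 3-pass bubble-sort swap loop by the closed-form median sum-max-min and replaces the 13-branch if-chain by a table lookup.
-- outside the precondition, e.g. on secondhighest(20, 20, 20): A returns None, B returns None
import Mathlib
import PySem

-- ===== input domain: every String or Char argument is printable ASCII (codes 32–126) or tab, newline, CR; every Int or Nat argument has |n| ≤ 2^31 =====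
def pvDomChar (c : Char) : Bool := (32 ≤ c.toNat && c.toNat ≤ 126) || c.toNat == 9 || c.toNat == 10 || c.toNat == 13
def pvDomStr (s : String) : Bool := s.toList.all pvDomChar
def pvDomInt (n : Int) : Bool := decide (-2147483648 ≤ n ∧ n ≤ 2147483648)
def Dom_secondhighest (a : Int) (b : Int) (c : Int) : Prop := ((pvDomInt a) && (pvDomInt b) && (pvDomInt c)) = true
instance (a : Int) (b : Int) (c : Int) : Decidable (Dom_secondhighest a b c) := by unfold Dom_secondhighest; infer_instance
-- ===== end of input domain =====

-- B replaces A's 3-pass bubble-sort swap loop by the closed-form median sum-max-min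
-- and the 13-branch if-chain by a table lookup (simpler).

-- ===== PORT A =====
-- numtoeng: Python returns None for n outside 1..13; that case is outside Pre_, ported as "".
def numtoengA (n : Int) : String :=
  if n = 1 then "Ace" else if n = 2 then "Two" else if n = 3 then "Three"
  else if n = 4 then "Four" else if n = 5 then "Five" else if n = 6 then "Six"
  else if n = 7 then "Seven" else if n = 8 then "Eight" else if n = 9 then "Nine"
  else if n = 10 then "Ten" else if n = 11 then "Jack" else if n = 12 then "Queen"
  else if n = 13 then "King" else ""

def secondhighest (a : Int) (b : Int) (c : Int) : String :=
  if a = 1 then numtoengA a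
  else if b = 1 then numtoengA b
  else if c = 1 then numtoengA c
  else
    -- for i in range(3): two conditional swaps per pass
    let s := (PySem.List.pyRange 0 3 1).foldl
      (fun (s : Int × Int × Int) (_ : Int) =>
        let a := s.1; let b := s.2.1; let c := s.2.2
        let p := if a < b then (b, a) else (a, b)
        let q := if p.2 < c then (c, p.2) else (p.2, c)
        (p.1, q.1, q.2))
      (a, b, c)
    numtoengA s.2.1

-- ===== PORT B =====
def cardNames : List String :=
  ["Ace", "Two", "Three", "Four", "Five", "Six", "Seven",
   "Eight", "Nine", "Ten", "Jack", "Queen", "King"]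

-- Source B returns None when the median is outside 1..13 (outside Pre_); ported as "".
-- CARD_NAMES[m-1] with 1 <= m <= 13 is always an in-range nonnegative index, so getD is exact.
def secondhighest_alt (a : Int) (b : Int) (c : Int) : String :=
  if a = 1 ∨ b = 1 ∨ c = 1 then "Ace"
  else
    let m := a + b + c - max a (max b c) - min a (min b c)
    if 1 ≤ m ∧ m ≤ 13 then cardNames.getD (m - 1).toNat "" else ""

-- ===== PRECONDITION & SPEC =====
-- Pre_ excludes inputs where A returns None (not a str): no card is an Ace and the
-- median of the three is outside 2..13, so numtoeng falls through all branches.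
def Pre_secondhighest (a : Int) (b : Int) (c : Int) : Prop :=
  a = 1 ∨ b = 1 ∨ c = 1 ∨
    (2 ≤ a + b + c - max a (max b c) - min a (min b c) ∧
     a + b + c - max a (max b c) - min a (min b c) ≤ 13)
instance (a : Int) (b : Int) (c : Int) : Decidable (Pre_secondhighest a b c) := by
  unfold Pre_secondhighest; infer_instance

def pvWitness_secondhighest : Int × Int × Int := (7, 2, 13)

def Spec_secondhighest (a : Int) (b : Int) (c : Int) (out : String) : Prop := out = secondhighest_alt a b c
instance (a : Int) (b : Int) (c : Int) (out : String) : Decidable (Spec_secondhighest a b c out) := by unfold Spec_secondhighest; infer_instance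

-- ===== CLAIM (what is proved, stated in full; the proofs are below) =====
def Claim_equal_secondhighest : Prop := ∀ (a : Int) (b : Int) (c : Int), Dom_secondhighest a b c → Pre_secondhighest a b c → Spec_secondhighest a b c (secondhighest a b c)

-- ===== LEMMAS AND PROOFS =====

theorem pyRange03 : PySem.List.pyRange 0 3 1 = [0, 1, 2] := by decide

-- A's three bubble passes leave the median of the three in the middle slot.
theorem bubble_mid (a b c : Int) (ha : ¬ a = 1) (hb : ¬ b = 1) (hc : ¬ c = 1) :
    secondhighest a b c =
      numtoengA (a + b + c - max a (max b c) - min a (min b c)) := by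
  unfold secondhighest
  simp only [ha, hb, hc, if_false, pyRange03, List.foldl_cons, List.foldl_nil]
  split_ifs <;> exact congrArg numtoengA (by omega)

-- On medians 2..13 the table lookup agrees with the if-chain.
theorem table_eq_chain (m : Int) (h2 : 2 ≤ m) (h13 : m ≤ 13) :
    cardNames.getD (m - 1).toNat "" = numtoengA m := by
  interval_cases m <;> rfl

-- ===== VERDICT (by name: the statement is the Claim_ definition above) =====
theorem secondhighest_spec : Claim_equal_secondhighest := by
  intro a b c _ hpre
  unfold Spec_secondhighest
  by_cases ha : a = 1
  · simp [secondhighest, secondhighest_alt, ha, numtoengA]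
  by_cases hb : b = 1
  · simp [secondhighest, secondhighest_alt, ha, hb, numtoengA]
  by_cases hc : c = 1
  · simp [secondhighest, secondhighest_alt, ha, hb, hc, numtoengA]
  have hm : 2 ≤ a + b + c - max a (max b c) - min a (min b c) ∧
      a + b + c - max a (max b c) - min a (min b c) ≤ 13 := by
    rcases hpre with h | h | h | h
    · exact absurd h ha
    · exact absurd h hb
    · exact absurd h hc
    · exact h
  rw [bubble_mid a b c ha hb hc]
  unfold secondhighest_alt
  rw [if_neg (by simp [ha, hb, hc]), if_pos ⟨by omega, hm.2⟩,
    table_eq_chain _ hm.1 hm.2]
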